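-- pv_equiv track=rewrite | github.com/piwi3910/paraprox | paraproxio.py | get_bytes_ranges
-- ===== SOURCE A (Python) =====
-- from typing import Tuple, Callable, Optional, List
--
-- def get_bytes_ranges(length: int, parts: int) -> List[Tuple[int, int]]:
--     """ Get bytes ranges """
--     ###################################################################################################
--     #
--     # length            = 89
--     # parts             = 4
--     # range_size        = length // parts = 89 // 4 = 22
--     # last_range_size   = range_size + length % parts = 22 + 89 % 4 = 22 + 1 = 23
--     #
--     # [<-----range_size----->|<-----range_size----->|<-----range_size----->|<---last_range_size---->|
--     # [**********************|**********************|**********************|**********************|*]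
--     # 0                      22                     44                     66                    88 89
--     #
--     ###################################################################################################
--     #
--     # length            = 89
--     # parts             = 5
--     # range_size        = length // parts = 89 // 5 = 17
--     # last_range_size   = range_size + length % parts = 17 + 89 % 5 = 17 + 4 = 21
--     #
--     # [<--range_size--->|<--range_size--->|<--range_size--->|<--range_size--->|<--last_range_size--->|
--     # [*****************|*****************|*****************|*****************|*****************|****]
--     # 0                 17                34                51                68                85   89
--     #
--     ###################################################################################################
--
--     range_size = length // parts
--     last_range_size = range_size + length % parts
--     last_range_idx = parts - 1
--     bytes_ranges = []
--     for part in range(0, last_range_idx):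
--         bytes_range = (part * range_size, ((part + 1) * range_size) - 1)
--         bytes_ranges.append(bytes_range)
--     last_range_offset = last_range_idx * range_size
--     bytes_ranges.append((last_range_offset, last_range_offset + last_range_size - 1))
--     return bytes_ranges
-- ===== SOURCE B (Python) =====
-- def get_bytes_ranges(length, parts):
--     """Get bytes ranges: sizes table + prefix-sum offsets, zipped into ranges."""
--     range_size = length // parts
--     last_range_size = range_size + length % parts
--     sizes = [range_size] * (parts - 1) + [last_range_size]
--     starts = [0]
--     for sz in sizes[:-1]:
--         starts.append(starts[-1] + sz)
--     return [(start, start + sz - 1) for start, sz in zip(starts, sizes)]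
-- ===== Notes on version B (the rewrite author's own statement) =====
-- stated objective: alternative
-- what changed: B builds an explicit sizes table ([range_size]*(parts-1)+[last_range_size]), derives start offsets as a prefix sum over it, and zips offsets with sizes into (start, start+size-1) pairs, replacing A's per-index multiplication loop and special-cased last append.
-- outside the precondition, e.g. on get_bytes_ranges(10, -2): A returns [(15, 9)], B returns [(0, -6)]
import Mathlib
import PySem

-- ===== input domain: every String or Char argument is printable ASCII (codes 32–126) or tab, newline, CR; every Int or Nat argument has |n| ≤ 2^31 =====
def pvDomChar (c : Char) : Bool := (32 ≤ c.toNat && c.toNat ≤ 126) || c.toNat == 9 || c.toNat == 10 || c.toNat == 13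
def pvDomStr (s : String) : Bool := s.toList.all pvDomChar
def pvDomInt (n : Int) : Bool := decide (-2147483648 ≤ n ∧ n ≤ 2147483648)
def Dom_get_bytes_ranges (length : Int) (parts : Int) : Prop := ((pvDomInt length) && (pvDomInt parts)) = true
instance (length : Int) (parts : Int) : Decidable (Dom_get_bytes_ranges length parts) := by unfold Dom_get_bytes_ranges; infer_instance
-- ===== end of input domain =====

-- B builds a sizes table and prefix-sum offsets instead of A's per-index multiplication loop (alternative decomposition, same cost).


-- ===== PORT A =====
def get_bytes_ranges (length : Int) (parts : Int) : List (Int × Int) :=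
  let range_size := PySem.Int.floordiv length parts
  let last_range_size := range_size + PySem.Int.mod length parts
  let last_range_idx := parts - 1
  let bytes_ranges : List (Int × Int) :=
    (PySem.List.pyRange 0 last_range_idx 1).foldl
      (fun acc part => acc ++ [(part * range_size, ((part + 1) * range_size) - 1)]) []
  let last_range_offset := last_range_idx * range_size
  bytes_ranges ++ [(last_range_offset, last_range_offset + last_range_size - 1)]

-- ===== PORT B =====
def get_bytes_ranges_alt (length : Int) (parts : Int) : List (Int × Int) :=
  let range_size := PySem.Int.floordiv length parts
  let last_range_size := range_size + PySem.Int.mod length parts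
  let sizes := List.replicate (parts - 1).toNat range_size ++ [last_range_size]
  let starts := (sizes.take (sizes.length - 1)).foldl
    (fun acc sz => acc ++ [acc.getLast! + sz]) [0]
  (starts.zip sizes).map (fun p => (p.1, p.1 + p.2 - 1))

-- ===== PRECONDITION & SPEC =====
-- Pre_ excludes parts ≤ 0: parts == 0 raises ZeroDivisionError in both programs, and a
-- negative number of parts is outside the function's natural domain — A's single range
-- there ((parts-1)*range_size, …) is an artefact of its unconditional last append.
def Pre_get_bytes_ranges (length : Int) (parts : Int) : Prop := 1 ≤ parts

instance (length : Int) (parts : Int) : Decidable (Pre_get_bytes_ranges length parts) := by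
  unfold Pre_get_bytes_ranges; infer_instance

def pvWitness_get_bytes_ranges : Int × Int := (89, 4)

def Spec_get_bytes_ranges (length : Int) (parts : Int) (out : List (Int × Int)) : Prop :=
  out = get_bytes_ranges_alt length parts

instance (length : Int) (parts : Int) (out : List (Int × Int)) : Decidable (Spec_get_bytes_ranges length parts out) := by
  unfold Spec_get_bytes_ranges; infer_instance

-- ===== CLAIM (what is proved, stated in full; the proofs are below) =====
def Claim_equal_get_bytes_ranges : Prop := ∀ (length : Int) (parts : Int), Dom_get_bytes_ranges length parts → Pre_get_bytes_ranges length parts → Spec_get_bytes_ranges length parts (get_bytes_ranges length parts)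

-- ===== LEMMAS AND PROOFS =====

-- A's loop is the map of the range window.
theorem portA_eq (length parts : Int) :
    get_bytes_ranges length parts =
      (PySem.List.pyRange 0 (parts - 1) 1).map
        (fun part => (part * PySem.Int.floordiv length parts,
                      ((part + 1) * PySem.Int.floordiv length parts) - 1))
      ++ [((parts - 1) * PySem.Int.floordiv length parts,
           (parts - 1) * PySem.Int.floordiv length parts
             + (PySem.Int.floordiv length parts + PySem.Int.mod length parts) - 1)] := by
  simp only [get_bytes_ranges, PySem.List.foldl_append_singleton_eq_map, List.nil_append]

-- B's prefix-sum loop over a constant sizes table yields the multiples of the size.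
theorem starts_foldl (n : ℕ) (rs : Int) (acc : List Int) (v : Int)
    (hv : acc.getLast! = v) (hne : acc ≠ []) :
    (List.replicate n rs).foldl (fun a sz => a ++ [a.getLast! + sz]) acc
      = acc ++ (List.range n).map (fun i : ℕ => v + ((i : Int) + 1) * rs) := by
  induction n generalizing acc v with
  | zero => simp
  | succ m ih =>
    rw [List.replicate_succ, List.foldl_cons, hv,
        ih (acc ++ [v + rs]) (v + rs) (by simp) (by simp)]
    rw [List.range_succ_eq_map]
    simp only [List.map_cons, List.map_map, List.append_assoc, List.singleton_append]
    congr 2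
    · push_cast; ring
    · apply List.map_congr_left
      intro i _
      simp only [Function.comp_apply]
      push_cast; ring

-- ===== VERDICT (by name: the statement is the Claim_ definition above) =====
theorem get_bytes_ranges_spec : Claim_equal_get_bytes_ranges := by
  intro length parts _ hp
  have hp' : 1 ≤ parts := hp
  have hcast : (((parts - 1).toNat : ℤ)) = parts - 1 := Int.toNat_of_nonneg (by omega)
  simp only [Spec_get_bytes_ranges, get_bytes_ranges_alt, List.length_append,
    List.length_replicate, List.length_cons, List.length_nil, Nat.add_sub_cancel,
    List.take_left']
  rw [portA_eq, PySem.List.pyRange_one]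
  set rs := PySem.Int.floordiv length parts with hrs
  set md := PySem.Int.mod length parts with hmd
  set n := (parts - 1).toNat with hn
  rw [starts_foldl n rs [0] 0 (by simp) (by simp), List.singleton_append]
  rw [show parts - 1 - 0 = parts - 1 from by ring]
  -- rewrite B's starts column as a map over range (n+1), split the zip at the last cell
  have hS : (0:ℤ) :: (List.range n).map (fun i : ℕ => (0:ℤ) + ((i:ℤ) + 1) * rs)
      = (List.range n).map (fun i : ℕ => (i:ℤ) * rs) ++ [(n:ℤ) * rs] := by
    rw [show (List.range n).map (fun i : ℕ => (i:ℤ) * rs) ++ [(n:ℤ) * rs]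
          = (List.range (n+1)).map (fun i : ℕ => (i:ℤ) * rs) from by
        rw [List.range_succ]; simp]
    rw [List.range_succ_eq_map, List.map_cons, List.map_map]
    refine congrArg₂ _ (by simp) ?_
    apply List.map_congr_left
    intro i _
    simp only [Function.comp_apply]
    push_cast; ring
  rw [hS]
  have hrepl : List.replicate n rs = (List.range n).map (fun _ : ℕ => rs) := by
    simp [List.map_const']
  rw [hrepl, List.zip_append (by simp), List.zip_map', List.map_append, List.map_map,
      List.map_map]
  refine congrArg₂ _ ?_ ?_
  · apply List.map_congr_left
    intro i _
    simp only [Function.comp_apply, Prod.mk.injEq]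
    constructor <;> ring
  · simp [hcast]
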